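-- pv_equiv track=rewrite | github.com/WillowMilk/partner-client | partner_client/session.py | _truncate_to_recent_pairs
-- ===== SOURCE A (Python) =====
-- from typing import Any
--
-- def _truncate_to_recent_pairs(
--     messages: list[dict[str, Any]],
--     keep_pairs: int,
-- ) -> tuple[list[dict[str, Any]], int]:
--     """Drop older non-system messages, keeping only the last N user/assistant pairs.
--
--     Tool messages associated with kept assistant turns (they appear AFTER an
--     assistant in the message stream) are preserved as part of the natural
--     slice. All system messages are preserved unchanged.
--
--     Returns (truncated_messages, dropped_count). `dropped_count` is the
--     number of non-system messages that were removed from the live context.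
--     If keep_pairs <= 0, or if there are fewer pairs than keep_pairs in the
--     input, the original messages are returned with dropped_count = 0.
--     """
--     if keep_pairs <= 0:
--         return messages, 0
--
--     system_msgs = [m for m in messages if m.get("role") == "system"]
--     chat_msgs = [m for m in messages if m.get("role") != "system"]
--
--     # Walk backwards counting user messages. The Nth-from-end user message
--     # is the cutoff: keep from there onwards. Anything earlier is dropped.
--     pairs_seen = 0
--     cutoff_user_idx: int | None = None
--     for i in range(len(chat_msgs) - 1, -1, -1):
--         if chat_msgs[i].get("role") == "user":
--             pairs_seen += 1
--             if pairs_seen == keep_pairs: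
--                 cutoff_user_idx = i
--                 break
--
--     if cutoff_user_idx is None:
--         # Fewer pairs than keep_pairs - no truncation needed
--         return messages, 0
--
--     kept_chat = chat_msgs[cutoff_user_idx:]
--     dropped_count = cutoff_user_idx
--     return system_msgs + kept_chat, dropped_count
-- ===== SOURCE B (Python) =====
-- from typing import Any
--
-- def _truncate_to_recent_pairs(
--     messages: list[dict[str, Any]],
--     keep_pairs: int,
-- ) -> tuple[list[dict[str, Any]], int]:
--     """Forward-pass re-implementation: build the table of user-message indices
--     once, then pick the keep_pairs-th from its end as the cutoff."""
--     if keep_pairs <= 0: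
--         return messages, 0
--     system_msgs = [m for m in messages if m.get("role") == "system"]
--     chat_msgs = [m for m in messages if m.get("role") != "system"]
--     user_indices = [i for i, m in enumerate(chat_msgs) if m.get("role") == "user"]
--     if len(user_indices) < keep_pairs:
--         return messages, 0
--     cutoff = user_indices[len(user_indices) - keep_pairs]
--     return system_msgs + chat_msgs[cutoff:], cutoff
-- ===== Notes on version B (the rewrite author's own statement) =====
-- stated objective: alternative
-- what changed: Replaces the early-terminating backward counting walk over chat messages with a single forward pass that builds the full table of user-message indices and picks the keep_pairs-th entry from its end as the cutoff.
import Mathlib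
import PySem

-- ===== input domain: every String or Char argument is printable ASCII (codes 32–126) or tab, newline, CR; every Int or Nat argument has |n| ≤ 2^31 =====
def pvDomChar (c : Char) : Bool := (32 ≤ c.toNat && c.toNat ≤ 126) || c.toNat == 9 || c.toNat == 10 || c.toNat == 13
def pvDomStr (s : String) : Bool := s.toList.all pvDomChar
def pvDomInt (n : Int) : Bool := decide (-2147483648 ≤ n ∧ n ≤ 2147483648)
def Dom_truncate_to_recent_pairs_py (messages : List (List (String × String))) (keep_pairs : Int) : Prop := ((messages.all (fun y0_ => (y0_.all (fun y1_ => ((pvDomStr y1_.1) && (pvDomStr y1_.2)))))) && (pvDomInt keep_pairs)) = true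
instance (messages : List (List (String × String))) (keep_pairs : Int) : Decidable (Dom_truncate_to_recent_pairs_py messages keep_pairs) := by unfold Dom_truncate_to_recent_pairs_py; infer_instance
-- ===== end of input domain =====

-- B replaces A's backward early-exit counting walk with a forward pass that builds
-- the full table of user-message indices and indexes it from the end (objective: alternative).


-- ===== PORT A =====
-- m.get("role"): first-match lookup in the association list (exact for a Python dict)
def pvGetRole : List (String × String) → Option String
  | [] => none
  | (k, v) :: rest => if k == "role" then some v else pvGetRole rest

-- the backward `for i in range(len(chat)-1,-1,-1)` loop with its break:
-- pvFindCut chat kp i seen scans indices i-1, i-2, …, 0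
def pvFindCut (chat : List (List (String × String))) (kp : Int) : Nat → Int → Option Nat
  | 0, _ => none
  | i + 1, seen =>
    if pvGetRole (chat.getD i []) == some "user" then
      if seen + 1 == kp then some i else pvFindCut chat kp i (seen + 1)
    else pvFindCut chat kp i seen

def truncate_to_recent_pairs_py (messages : List (List (String × String))) (keep_pairs : Int) : (List (List (String × String))) × Int :=
  if keep_pairs ≤ 0 then (messages, 0)
  else
    let system_msgs := messages.filter (fun m => pvGetRole m == some "system")
    let chat_msgs := messages.filter (fun m => !(pvGetRole m == some "system"))
    match pvFindCut chat_msgs keep_pairs chat_msgs.length 0 with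
    | none => (messages, 0)
    | some cutoff => (system_msgs ++ chat_msgs.drop cutoff, Int.ofNat cutoff)

-- ===== PORT B =====
def truncate_to_recent_pairs_py_alt (messages : List (List (String × String))) (keep_pairs : Int) : (List (List (String × String))) × Int :=
  if keep_pairs ≤ 0 then (messages, 0)
  else
    let system_msgs := messages.filter (fun m => pvGetRole m == some "system")
    let chat_msgs := messages.filter (fun m => !(pvGetRole m == some "system"))
    let user_indices := (PySem.List.enumerate chat_msgs).filterMap
      (fun p => if pvGetRole p.2 == some "user" then some p.1 else none)
    if Int.ofNat user_indices.length < keep_pairs then (messages, 0)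
    else
      let cutoff := user_indices.getD (user_indices.length - keep_pairs.toNat) 0
      (system_msgs ++ chat_msgs.drop cutoff.toNat, cutoff)

-- ===== PRECONDITION & SPEC =====
def Spec_truncate_to_recent_pairs_py (messages : List (List (String × String))) (keep_pairs : Int) (out : (List (List (String × String))) × Int) : Prop := out = truncate_to_recent_pairs_py_alt messages keep_pairs
instance (messages : List (List (String × String))) (keep_pairs : Int) (out : (List (List (String × String))) × Int) : Decidable (Spec_truncate_to_recent_pairs_py messages keep_pairs out) := by unfold Spec_truncate_to_recent_pairs_py; infer_instance

-- ===== CLAIM (what is proved, stated in full; the proofs are below) =====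
def Claim_equal_truncate_to_recent_pairs_py : Prop := ∀ (messages : List (List (String × String))) (keep_pairs : Int), Dom_truncate_to_recent_pairs_py messages keep_pairs → Spec_truncate_to_recent_pairs_py messages keep_pairs (truncate_to_recent_pairs_py messages keep_pairs)

-- ===== LEMMAS AND PROOFS =====

-- indices (offset by k) of the "user" messages in a chat list
def pvUI : List (List (String × String)) → Nat → List Nat
  | [], _ => []
  | m :: rest, k =>
    if pvGetRole m == some "user" then k :: pvUI rest (k + 1) else pvUI rest (k + 1)

theorem pvUI_append (xs ys : List (List (String × String))) (k : Nat) :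
    pvUI (xs ++ ys) k = pvUI xs k ++ pvUI ys (k + xs.length) := by
  induction xs generalizing k with
  | nil => simp [pvUI]
  | cons m rest ih =>
    simp only [List.cons_append, pvUI, ih, List.length_cons]
    have h2 : k + 1 + rest.length = k + (rest.length + 1) := by omega
    rw [h2]
    split_ifs <;> simp

theorem pvEnum_filterMap (xs : List (List (String × String))) (k : Nat) :
    (PySem.List.enumerate xs (Int.ofNat k)).filterMap
      (fun p => if pvGetRole p.2 == some "user" then some p.1 else none)
    = (pvUI xs k).map Int.ofNat := by
  induction xs generalizing k with
  | nil => simp [PySem.List.enumerate_nil, pvUI]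
  | cons m rest ih =>
    have h1 : (Int.ofNat k) + 1 = Int.ofNat (k + 1) := by simp only [Int.ofNat_eq_natCast]; push_cast; ring
    rw [PySem.List.enumerate_cons, List.filterMap_cons, h1, ih]
    simp only [pvUI]
    split_ifs <;> simp

theorem pvMap_getD (l : List Nat) (n : Nat) :
    (l.map Int.ofNat).getD n 0 = Int.ofNat (l.getD n 0) := by
  induction l generalizing n with
  | nil => simp
  | cons a t ih =>
    cases n with
    | zero => simp
    | succ n => rw [List.map_cons, List.getD_cons_succ, List.getD_cons_succ]; exact ih n

-- characterisation of A's backward loop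
theorem pvFindCut_eq (chat : List (List (String × String))) (kp : Int)
    (i : Nat) (hi : i ≤ chat.length) (seen : Int) (h0 : 0 ≤ seen) (h1 : seen + 1 ≤ kp) :
    pvFindCut chat kp i seen =
      (if kp ≤ seen + (pvUI (chat.take i) 0).length
       then some ((pvUI (chat.take i) 0).getD
              ((pvUI (chat.take i) 0).length - (kp - seen).toNat) 0)
       else none) := by
  induction i generalizing seen with
  | zero =>
    simp only [pvFindCut, List.take_zero, pvUI, List.length_nil]
    rw [if_neg (by omega)]
  | succ i ih =>
    have hlt : i < chat.length := by omega
    have hget : chat.getD i [] = chat[i] := by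
      simp [List.getD, List.getElem?_eq_getElem hlt]
    have hlen : (chat.take i).length = i := by simp; omega
    have htake : chat.take (i + 1) = chat.take i ++ [chat[i]] := by
      rw [List.take_add_one, List.getElem?_eq_getElem hlt]; rfl
    set u := pvUI (chat.take i) 0 with hu
    have hui : pvUI (chat.take (i + 1)) 0
        = u ++ (if pvGetRole chat[i] == some "user" then [i] else []) := by
      rw [htake, pvUI_append, hlen, hu]
      cases h : pvGetRole chat[i] == some "user" <;> simp [pvUI, h]
    rw [hui]
    simp only [pvFindCut, hget]
    by_cases huser : (pvGetRole chat[i] == some "user") = true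
    · simp only [huser, if_true]
      by_cases heq : seen + 1 = kp
      · have hbe : (seen + 1 == kp) = true := by simpa using heq
        simp only [hbe, if_true]
        have hc : kp ≤ seen + ((u ++ [i]).length : Int) := by
          simp only [List.length_append, List.length_cons, List.length_nil]
          push_cast; omega
        rw [if_pos hc]
        have ht : (u ++ [i]).length - (kp - seen).toNat = u.length := by
          have : (kp - seen).toNat = 1 := by omega
          simp [this]
        rw [ht, List.getD_eq_getElem?_getD]
        simp
      · have hbe : (seen + 1 == kp) = false := by simpa using heq
        simp only [hbe, Bool.false_eq_true, if_false]
        rw [ih (by omega) (seen + 1) (by omega) (by omega)]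
        have hlen2 : ((u ++ [i]).length : Int) = (u.length : Int) + 1 := by
          simp only [List.length_append, List.length_cons, List.length_nil]; push_cast; ring
        by_cases hc : kp ≤ seen + 1 + (u.length : Int)
        · rw [if_pos hc, if_pos (by omega : kp ≤ seen + ((u ++ [i]).length : Int))]
          have hidx : (u ++ [i]).length - (kp - seen).toNat
              = u.length - (kp - (seen + 1)).toNat := by
            simp only [List.length_append, List.length_cons, List.length_nil]
            omega
          have hlt2 : u.length - (kp - (seen + 1)).toNat < u.length := by
            have h2 : 1 ≤ kp - (seen + 1) := by omega
            have h3 : kp - (seen + 1) ≤ (u.length : Int) := by omega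
            omega
          rw [hidx, List.getD_eq_getElem?_getD, List.getD_eq_getElem?_getD,
              List.getElem?_append_left hlt2]
        · rw [if_neg hc, if_neg (by omega : ¬ kp ≤ seen + ((u ++ [i]).length : Int))]
    · simp only [huser, Bool.false_eq_true, if_false]
      rw [ih (by omega) seen h0 h1]
      simp

-- ===== VERDICT (by name: the statement is the Claim_ definition above) =====
theorem truncate_to_recent_pairs_py_spec : Claim_equal_truncate_to_recent_pairs_py := by
  intro messages kp _
  unfold Spec_truncate_to_recent_pairs_py truncate_to_recent_pairs_py truncate_to_recent_pairs_py_alt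
  by_cases hkp : kp ≤ 0
  · simp [hkp]
  · rw [if_neg hkp, if_neg hkp]
    set chat := messages.filter (fun m => !(pvGetRole m == some "system")) with hchat
    have hU : (PySem.List.enumerate chat).filterMap
        (fun p => if pvGetRole p.2 == some "user" then some p.1 else none)
      = (pvUI chat 0).map Int.ofNat := by simpa using pvEnum_filterMap chat 0
    set U := pvUI chat 0 with hUdef
    have hcut := pvFindCut_eq chat kp chat.length (le_refl _) 0 (le_refl _) (by omega)
    rw [List.take_length, ← hUdef] at hcut
    simp only [hU, hcut, List.length_map]
    by_cases hc : kp ≤ (0 : Int) + (U.length : Int)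
    · rw [if_pos hc]
      have hnotlt : ¬ (Int.ofNat U.length < kp) := by simp only [Int.ofNat_eq_natCast]; omega
      simp only [if_neg hnotlt]
      have hsub : (kp - 0).toNat = kp.toNat := by omega
      rw [hsub, pvMap_getD]
      simp
    · rw [if_neg hc]
      have hlt : Int.ofNat U.length < kp := by simp only [Int.ofNat_eq_natCast]; omega
      simp only [if_pos hlt]
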